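-- pv_equiv track=rewrite | github.com/Cineg/Advent-of-Code | trebuchet.py | find_in_string
-- ===== SOURCE A (Python) =====
-- def find_in_string(string: str, start_index: int, end_index: int) -> int | None:
--     nums: dict = {
--         "one": 1,
--         "two": 2,
--         "three": 3,
--         "four": 4,
--         "five": 5,
--         "six": 6,
--         "seven": 7,
--         "eight": 8,
--         "nine": 9,
--     }
--
--     current_num: int = 0
--     index: int = -1
--     find_index: int = -1
--     for item in nums:
--         find_index = string.rfind(item, start_index, end_index)
--         if find_index != -1:
--             if find_index > index:
--                 current_num = nums[item]
--                 index = find_index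
--
--     if current_num != 0:
--         return current_num
-- ===== SOURCE B (Python) =====
-- def find_in_string(string: str, start_index: int, end_index: int) -> int | None:
--     nums: dict = {
--         "one": 1,
--         "two": 2,
--         "three": 3,
--         "four": 4,
--         "five": 5,
--         "six": 6,
--         "seven": 7,
--         "eight": 8,
--         "nine": 9,
--     }
--     n = len(string)
--     lo = start_index + n if start_index < 0 else start_index
--     lo = max(0, min(lo, n))
--     hi = end_index + n if end_index < 0 else end_index
--     hi = max(0, min(hi, n))
--     for i in range(hi - 1, lo - 1, -1):
--         for word, value in nums.items():
--             if i + len(word) <= hi and string[i:i + len(word)] == word: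
--                 return value
--     return None
-- ===== Notes on version B (the rewrite author's own statement) =====
-- stated objective: alternative
-- what changed: A calls str.rfind once per number word and keeps the word with the largest index; B does a single right-to-left scan over the positions of the clamped [start_index, end_index) window and returns the value of the first word that starts at the current position and fits before the window end.
import Mathlib
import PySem

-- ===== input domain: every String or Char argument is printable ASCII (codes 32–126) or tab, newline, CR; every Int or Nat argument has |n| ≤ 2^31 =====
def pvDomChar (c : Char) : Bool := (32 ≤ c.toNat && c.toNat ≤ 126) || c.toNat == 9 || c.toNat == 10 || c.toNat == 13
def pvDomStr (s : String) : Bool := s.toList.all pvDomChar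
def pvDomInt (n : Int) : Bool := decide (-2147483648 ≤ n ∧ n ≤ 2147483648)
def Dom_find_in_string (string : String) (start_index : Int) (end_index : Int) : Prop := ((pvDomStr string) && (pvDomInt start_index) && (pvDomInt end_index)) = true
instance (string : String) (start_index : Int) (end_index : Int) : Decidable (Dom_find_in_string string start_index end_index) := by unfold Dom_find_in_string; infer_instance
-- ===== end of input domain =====

-- B replaces the nine rfind substring searches by a single right-to-left scan over the
-- positions of the clamped window, returning the value of the first number word that
-- starts at the current position and fits before the window end (objective: alternative).

-- ===== PORT A =====
def pvNumsA : List (String × Int) :=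
  [("one", 1), ("two", 2), ("three", 3), ("four", 4), ("five", 5),
   ("six", 6), ("seven", 7), ("eight", 8), ("nine", 9)]

def find_in_string (string : String) (start_index : Int) (end_index : Int) : Option Int :=
  let r := pvNumsA.foldl (fun (acc : Int × Int) wv =>
    let find_index := PySem.Str.rfindFrom string wv.1 start_index (some end_index)
    if find_index ≠ -1 then
      if find_index > acc.2 then (wv.2, find_index) else acc
    else acc) (0, -1)
  if r.1 ≠ 0 then some r.1 else none

-- ===== PORT B =====
-- the loop "for i in range(hi - 1, lo - 1, -1)" with early return; cnt counts the
-- remaining iterations, the current position is i = lo + cnt - 1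
def pvScanB (cs : List Char) (lo : Int) (hi : Int) : Nat → Option Int
  | 0 => none
  | k + 1 =>
    let i : Int := lo + k
    match pvNumsA.findSome? (fun wv =>
        if (i + (wv.1.toList.length : Int) ≤ hi ∧
            PySem.Chars.slice cs (some i) (some (i + (wv.1.toList.length : Int))) = wv.1.toList)
        then some wv.2 else none) with
    | some v => some v
    | none => pvScanB cs lo hi k

def find_in_string_alt (string : String) (start_index : Int) (end_index : Int) : Option Int :=
  let n : Int := PySem.Str.len string
  let lo := max 0 (min (if start_index < 0 then start_index + n else start_index) n)
  let hi := max 0 (min (if end_index < 0 then end_index + n else end_index) n)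
  pvScanB string.toList lo hi (hi - lo).toNat

-- ===== PRECONDITION & SPEC =====
def Spec_find_in_string (string : String) (start_index : Int) (end_index : Int) (out : Option Int) : Prop := out = find_in_string_alt string start_index end_index
instance (string : String) (start_index : Int) (end_index : Int) (out : Option Int) : Decidable (Spec_find_in_string string start_index end_index out) := by unfold Spec_find_in_string; infer_instance

-- ===== CLAIM (what is proved, stated in full; the proofs are below) =====
def Claim_equal_find_in_string : Prop := ∀ (string : String) (start_index : Int) (end_index : Int), Dom_find_in_string string start_index end_index → Spec_find_in_string string start_index end_index (find_in_string string start_index end_index)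

-- ===== LEMMAS AND PROOFS =====

-- clamped window bounds (the lo/hi of B; pvHiI is also the e of rfindFrom, and
-- pvLoI is min st n for rfindFrom's st)
def pvLoI (n : Nat) (a : Int) : Int := max 0 (min (if a < 0 then a + n else a) n)
def pvHiI (n : Nat) (b : Int) : Int := max 0 (min (if b < 0 then b + n else b) n)

-- r of a word = what A's rfind call returns for it
def pvR (string : String) (a b : Int) (wv : String × Int) : Int :=
  PySem.Str.rfindFrom string wv.1 a (some b)

-- "word wv matches at position i inside the window"
def pvW (cs : List Char) (a b : Int) (wv : String × Int) (i : Nat) : Prop :=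
  pvLoI cs.length a ≤ (i : Int) ∧ (i : Int) + wv.1.toList.length ≤ pvHiI cs.length b ∧
    wv.1.toList <+: cs.drop i

-- A's fold, reformulated head-recursively: the best (value, index) pair, first word wins ties
def pvRef (string : String) (a b : Int) : List (String × Int) → Option (Int × Int)
  | [] => none
  | wv :: rest =>
    match pvRef string a b rest with
    | none => if pvR string a b wv ≠ -1 then some (wv.2, pvR string a b wv) else none
    | some (v, m) =>
      if pvR string a b wv ≠ -1 ∧ pvR string a b wv ≥ m then some (wv.2, pvR string a b wv)
      else some (v, m)

-- B's inner loop over the words at one position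
def pvInner (cs : List Char) (hi : Int) (i : Int) : Option Int :=
  pvNumsA.findSome? (fun wv =>
    if (i + (wv.1.toList.length : Int) ≤ hi ∧
        PySem.Chars.slice cs (some i) (some (i + (wv.1.toList.length : Int))) = wv.1.toList)
    then some wv.2 else none)

lemma pv_scanB_succ (cs : List Char) (lo hi : Int) (k : Nat) :
    pvScanB cs lo hi (k + 1) =
      match pvInner cs hi (lo + k) with
      | some v => some v
      | none => pvScanB cs lo hi k := rfl

lemma pv_go_spec (s sub : List Char) (k : Nat) :
    (PySem.Chars.rfind.go s sub k = -1 ∧ ∀ j : Nat, j ≤ k → ¬ sub <+: s.drop j) ∨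
    (∃ m : Nat, PySem.Chars.rfind.go s sub k = (m : Int) ∧ m ≤ k ∧ sub <+: s.drop m ∧
      ∀ j : Nat, m < j → j ≤ k → ¬ sub <+: s.drop j) := by
  induction k with
  | zero =>
    by_cases hp : sub.isPrefixOf s
    · refine Or.inr ⟨0, ?_, le_refl 0, ?_, ?_⟩
      · show (if sub.isPrefixOf s = true then (0 : Int) else -1) = 0
        simp [hp]
      · simpa using List.isPrefixOf_iff_prefix.mp hp
      · intro j h1 h2; omega
    · refine Or.inl ⟨?_, ?_⟩
      · show (if sub.isPrefixOf s = true then (0 : Int) else -1) = -1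
        simp [hp]
      · intro j hj hpre
        have hj0 : j = 0 := by omega
        subst hj0
        exact hp (List.isPrefixOf_iff_prefix.mpr (by simpa using hpre))
  | succ j ih =>
    have hstep : PySem.Chars.rfind.go s sub (j + 1) =
        if sub.isPrefixOf (s.drop (j + 1)) then ((j + 1 : Nat) : Int)
        else PySem.Chars.rfind.go s sub j := rfl
    by_cases hp : sub.isPrefixOf (s.drop (j + 1))
    · refine Or.inr ⟨j + 1, by rw [hstep]; simp [hp], le_refl _,
        List.isPrefixOf_iff_prefix.mp hp, ?_⟩
      intro j' h1 h2; omega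
    · have hnp : ¬ sub <+: s.drop (j + 1) := fun h => hp (List.isPrefixOf_iff_prefix.mpr h)
      rw [hstep, if_neg hp]
      rcases ih with ⟨h1, h2⟩ | ⟨m, h1, h2, h3, h4⟩
      · refine Or.inl ⟨h1, ?_⟩
        intro j' hj'
        rcases Nat.lt_or_ge j' (j + 1) with h | h
        · exact h2 j' (by omega)
        · have : j' = j + 1 := by omega
          subst this; exact hnp
      · refine Or.inr ⟨m, h1, by omega, h3, ?_⟩
        intro j' hm hj'
        rcases Nat.lt_or_ge j' (j + 1) with h | h
        · exact h4 j' hm (by omega)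
        · have : j' = j + 1 := by omega
          subst this; exact hnp

lemma pv_rfindFrom_spec (cs sub : List Char) (a b : Int) (hsub : sub ≠ []) :
    (PySem.Chars.rfindFrom cs sub a (some b) = -1 ∧
      ∀ i : Nat, pvLoI cs.length a ≤ (i : Int) → (i : Int) + sub.length ≤ pvHiI cs.length b →
        ¬ sub <+: cs.drop i) ∨
    (∃ m : Nat, PySem.Chars.rfindFrom cs sub a (some b) = (m : Int) ∧
      pvLoI cs.length a ≤ (m : Int) ∧ (m : Int) + sub.length ≤ pvHiI cs.length b ∧
      sub <+: cs.drop m ∧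
      ∀ i : Nat, m < i → (i : Int) + sub.length ≤ pvHiI cs.length b → ¬ sub <+: cs.drop i) := by
  have hsublen : 1 ≤ sub.length := by
    cases sub with
    | nil => exact absurd rfl hsub
    | cons x xs => simp
  set n : Int := (cs.length : Int) with hn
  set st : Int := if a < 0 then (if a + n < 0 then 0 else a + n) else a with hst
  set e : Int := if n < b then n else if b < 0 then (if b + n < 0 then 0 else b + n) else b with he
  have hunfold : PySem.Chars.rfindFrom cs sub a (some b) =
      if e < st then -1
      else (if PySem.Chars.rfind ((cs.take e.toNat).drop st.toNat) sub = -1 then -1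
            else st + PySem.Chars.rfind ((cs.take e.toNat).drop st.toNat) sub) := by
    rw [hst, he, hn]
    rfl
  have hst0 : 0 ≤ st := by rw [hst]; split_ifs <;> omega
  have he0 : 0 ≤ e := by rw [he]; split_ifs <;> omega
  have hen : e ≤ n := by rw [he]; split_ifs <;> omega
  have hlo : pvLoI cs.length a = min st n := by
    rw [pvLoI, hst, hn]; split_ifs <;> omega
  have hhi : pvHiI cs.length b = e := by
    rw [pvHiI, he, hn]; split_ifs <;> omega
  -- a position fits the window iff it is a go-match of the sliced string
  have hkey : ∀ j : Nat, (sub <+: ((cs.take e.toNat).drop st.toNat).drop j ↔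
      (sub <+: cs.drop (st.toNat + j) ∧ ((st.toNat + j : Nat) : Int) + sub.length ≤ e)) := by
    intro j
    rw [List.drop_drop, List.drop_take, List.prefix_take_iff]
    constructor
    · rintro ⟨hp, hl2⟩
      exact ⟨hp, by omega⟩
    · rintro ⟨hp, hl2⟩
      exact ⟨hp, by omega⟩
  by_cases hes : e < st
  · left
    rw [hunfold, if_pos hes]
    refine ⟨rfl, ?_⟩
    intro i hil hif hpre
    rw [hhi] at hif
    rw [hlo] at hil
    omega
  · push_neg at hes
    have hste : st ≤ n := le_trans hes hen
    have hlo' : pvLoI cs.length a = st := by rw [hlo]; omega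
    have hlen : (((cs.take e.toNat).drop st.toNat).length : Int) = e - st := by
      simp [List.length_drop, List.length_take]
      omega
    have hrf : PySem.Chars.rfind ((cs.take e.toNat).drop st.toNat) sub =
        PySem.Chars.rfind.go ((cs.take e.toNat).drop st.toNat) sub
          ((cs.take e.toNat).drop st.toNat).length := rfl
    rcases pv_go_spec ((cs.take e.toNat).drop st.toNat) sub
        ((cs.take e.toNat).drop st.toNat).length with ⟨h1, h2⟩ | ⟨m, h1, h2, h3, h4⟩
    · left
      rw [hunfold, if_neg (by omega), hrf, h1, if_pos rfl]
      refine ⟨rfl, ?_⟩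
      intro i hil hif hpre
      rw [hhi] at hif
      rw [hlo'] at hil
      have hjle : (i - st.toNat) ≤ ((cs.take e.toNat).drop st.toNat).length := by omega
      refine h2 (i - st.toNat) hjle ((hkey (i - st.toNat)).mpr ⟨?_, by push_cast; omega⟩)
      have : st.toNat + (i - st.toNat) = i := by omega
      rw [this]
      exact hpre
    · right
      refine ⟨st.toNat + m, ?_, ?_, ?_, ?_, ?_⟩
      · rw [hunfold, if_neg (by omega), hrf, h1]
        rw [if_neg (by omega)]
        push_cast
        omega
      · rw [hlo']; push_cast; omega
      · rw [hhi]
        have := (hkey m).mp h3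
        push_cast at this ⊢
        omega
      · exact ((hkey m).mp h3).1
      · intro i him hif hpre
        rw [hhi] at hif
        have hjle : (i - st.toNat) ≤ ((cs.take e.toNat).drop st.toNat).length := by omega
        refine h4 (i - st.toNat) (by omega) hjle ((hkey (i - st.toNat)).mpr ⟨?_, by push_cast; omega⟩)
        have : st.toNat + (i - st.toNat) = i := by omega
        rw [this]
        exact hpre

-- pvR characterised by window matches
lemma pv_r_spec (string : String) (a b : Int) (wv : String × Int) (hsub : wv.1.toList ≠ []) :
    (pvR string a b wv = -1 ∧ ∀ i : Nat, ¬ pvW string.toList a b wv i) ∨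
    (∃ m : Nat, pvR string a b wv = (m : Int) ∧ pvW string.toList a b wv m ∧
      ∀ i : Nat, m < i → ¬ pvW string.toList a b wv i) := by
  have h := pv_rfindFrom_spec string.toList wv.1.toList a b hsub
  rw [pvR, PySem.Str.rfindFrom]
  rcases h with ⟨h1, h2⟩ | ⟨m, h1, h2, h3, h4, h5⟩
  · exact Or.inl ⟨h1, fun i hW => h2 i hW.1 hW.2.1 hW.2.2⟩
  · exact Or.inr ⟨m, h1, ⟨h2, h3, h4⟩, fun i hi hW => h5 i hi hW.2.1 hW.2.2⟩

lemma pv_r_cases (string : String) (a b : Int) (wv : String × Int) (hsub : wv.1.toList ≠ []) :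
    pvR string a b wv = -1 ∨ 0 ≤ pvR string a b wv := by
  rcases pv_r_spec string a b wv hsub with ⟨h1, _⟩ | ⟨m, h1, _, _⟩
  · exact Or.inl h1
  · right; rw [h1]; positivity

lemma pv_words_ok : ∀ wv ∈ pvNumsA, wv.1.toList ≠ [] ∧ wv.2 ≠ 0 := by decide

-- A's foldl in terms of pvRef
lemma pv_fold_ref (string : String) (a b : Int) (l : List (String × Int)) (c i : Int) :
    l.foldl (fun (acc : Int × Int) wv =>
      let find_index := PySem.Str.rfindFrom string wv.1 a (some b)
      if find_index ≠ -1 then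
        if find_index > acc.2 then (wv.2, find_index) else acc
      else acc) (c, i) =
      match pvRef string a b l with
      | none => (c, i)
      | some (v, m) => if m > i then (v, m) else (c, i) := by
  induction l generalizing c i with
  | nil => rfl
  | cons wv rest ih =>
    show rest.foldl _ (if pvR string a b wv ≠ -1 then
        (if pvR string a b wv > i then (wv.2, pvR string a b wv) else (c, i)) else (c, i)) = _
    by_cases hr : pvR string a b wv = -1
    · simp only [hr]
      rw [show (if (-1 : Int) ≠ -1 then (if (-1:Int) > i then (wv.2, (-1:Int)) else (c, i)) else (c, i)) = (c, i) by simp]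
      rw [ih c i]
      show _ = match pvRef string a b (wv :: rest) with
        | none => (c, i) | some (v, m) => if m > i then (v, m) else (c, i)
      rw [pvRef]
      rcases hrest : pvRef string a b rest with _ | ⟨v, m⟩
      · simp [hr]
      · simp [hr]
    · rw [if_pos hr]
      by_cases hri : pvR string a b wv > i
      · rw [if_pos hri, ih]
        show _ = match pvRef string a b (wv :: rest) with
          | none => (c, i) | some (v, m) => if m > i then (v, m) else (c, i)
        rw [pvRef]
        rcases hrest : pvRef string a b rest with _ | ⟨v, m⟩
        · simp [hr, hri]
        · by_cases hm : m ≤ pvR string a b wv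
          · simp [hr, hm, hri]
          · push_neg at hm
            simp [hr, hm.not_ge]
            rw [if_pos hm, if_pos (show i < m by omega)]
      · push_neg at hri
        rw [if_neg (by omega), ih]
        show _ = match pvRef string a b (wv :: rest) with
          | none => (c, i) | some (v, m) => if m > i then (v, m) else (c, i)
        rw [pvRef]
        rcases hrest : pvRef string a b rest with _ | ⟨v, m⟩
        · simp [hr]
          omega
        · by_cases hm : m ≤ pvR string a b wv
          · simp only [hr, hm, ne_eq, not_false_eq_true, and_self, if_true]
            rw [if_neg (by omega), if_neg (by omega)]
          · push_neg at hm
            simp [hr, hm.not_ge]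

-- pvRef's result: none iff every word misses; else best index, value of the first word at it
lemma pv_ref_spec (string : String) (a b : Int) :
    ∀ l : List (String × Int), (∀ wv ∈ l, wv.1.toList ≠ []) →
    (pvRef string a b l = none ∧ ∀ wv ∈ l, pvR string a b wv = -1) ∨
    (∃ v m l1 wv l2, pvRef string a b l = some (v, m) ∧ l = l1 ++ wv :: l2 ∧
      pvR string a b wv = m ∧ v = wv.2 ∧ pvR string a b wv ≠ -1 ∧
      (∀ w' ∈ l1, pvR string a b w' < m) ∧ (∀ w' ∈ l, pvR string a b w' ≤ m)) := by
  intro l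
  induction l with
  | nil => exact fun _ => Or.inl ⟨rfl, by simp⟩
  | cons wv rest ih =>
    intro hwords
    have ihr := ih (fun w h => hwords w (List.mem_cons_of_mem _ h))
    rcases ihr with ⟨h1, h2⟩ | ⟨v, m, l1, wv', l2, h1, h2, h3, h4, h5, h6, h7⟩
    · by_cases hr : pvR string a b wv = -1
      · refine Or.inl ⟨?_, ?_⟩
        · rw [pvRef, h1]; simp [hr]
        · intro w' hw'
          rcases List.mem_cons.mp hw' with h | h
          · subst h; exact hr
          · exact h2 w' h
      · refine Or.inr ⟨wv.2, pvR string a b wv, [], wv, rest, ?_, by simp, rfl, rfl, hr, ?_, ?_⟩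
        · rw [pvRef, h1]; simp [hr]
        · simp
        · intro w' hw'
          rcases List.mem_cons.mp hw' with h | h
          · subst h; exact le_refl _
          · rw [h2 w' h]
            rcases pv_r_cases string a b wv (hwords wv List.mem_cons_self) with hc | hc
            · exact absurd hc hr
            · omega
    · have hwv' : wv'.1.toList ≠ [] :=
        hwords wv' (List.mem_cons_of_mem _ (by rw [h2]; simp))
      have hm0 : 0 ≤ m := by
        rcases pv_r_cases string a b wv' hwv' with hc | hc
        · exact absurd hc h5
        · omega
      by_cases hge : pvR string a b wv ≠ -1 ∧ pvR string a b wv ≥ m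
      · refine Or.inr ⟨wv.2, pvR string a b wv, [], wv, rest, ?_, by simp, rfl, rfl, hge.1, ?_, ?_⟩
        · rw [pvRef, h1]
          dsimp only
          rw [if_pos hge]
        · simp
        · intro w' hw'
          rcases List.mem_cons.mp hw' with h | h
          · subst h; exact le_refl _
          · exact le_trans (h7 w' h) hge.2
      · refine Or.inr ⟨v, m, wv :: l1, wv', l2, ?_, by rw [h2]; rfl, h3, h4, h5, ?_, ?_⟩
        · rw [pvRef, h1]
          dsimp only
          rw [if_neg hge]
        · intro w' hw'
          rcases List.mem_cons.mp hw' with h | h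
          · subst h
            rcases Decidable.not_and_iff_or_not.mp hge with h | h
            · push_neg at h
              rw [h]; omega
            · omega
          · exact h6 w' h
        · intro w' hw'
          rcases List.mem_cons.mp hw' with h | h
          · subst h
            rcases Decidable.not_and_iff_or_not.mp hge with h | h
            · push_neg at h
              rw [h]; omega
            · omega
          · exact h7 w' h

-- the condition in B's inner loop is exactly "fits before hi and the word starts at i"
lemma pv_cond_iff (cs : List Char) (b : Int) (wv : String × Int) (i : Int)
    (hi0 : 0 ≤ i) :
    ((i + (wv.1.toList.length : Int) ≤ pvHiI cs.length b ∧
      PySem.Chars.slice cs (some i) (some (i + (wv.1.toList.length : Int))) = wv.1.toList)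
     ↔ ((i + (wv.1.toList.length : Int) ≤ pvHiI cs.length b) ∧ wv.1.toList <+: cs.drop i.toNat)) := by
  have hs : PySem.Chars.slice cs (some i) (some (i + (wv.1.toList.length : Int))) =
      (cs.drop i.toNat).take ((i + (wv.1.toList.length : Int)).toNat - i.toNat) := by
    rw [PySem.Chars.slice_eq_listSlice]
    exact PySem.List.slice_toNat cs hi0 (by positivity)
  have htn : (i + (wv.1.toList.length : Int)).toNat - i.toNat = wv.1.toList.length := by omega
  rw [hs, htn]
  constructor
  · rintro ⟨h1, h2⟩
    exact ⟨h1, List.prefix_iff_eq_take.mpr h2.symm⟩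
  · rintro ⟨h1, h2⟩
    exact ⟨h1, (List.prefix_iff_eq_take.mp h2).symm⟩

lemma pv_inner_none (cs : List Char) (a b : Int) (i : Int)
    (hi0 : pvLoI cs.length a ≤ i)
    (hnone : ∀ wv ∈ pvNumsA, ¬ pvW cs a b wv i.toNat) :
    pvInner cs (pvHiI cs.length b) i = none := by
  rw [pvInner, List.findSome?_eq_none_iff]
  intro wv hwv
  rw [if_neg]
  have hlo0 : 0 ≤ pvLoI cs.length a := by rw [pvLoI]; omega
  intro hcond
  rw [pv_cond_iff cs b wv i (by omega)] at hcond
  have hi' : ((i.toNat : Int)) = i := by omega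
  exact hnone wv (hwv) ⟨by omega, by rw [hi']; exact hcond.1, hcond.2⟩

lemma pv_scan_none (cs : List Char) (lo hi : Int) (cnt : Nat)
    (h : ∀ k : Nat, k < cnt → pvInner cs hi (lo + k) = none) :
    pvScanB cs lo hi cnt = none := by
  induction cnt with
  | zero => rfl
  | succ k ih =>
    rw [pv_scanB_succ, h k (by omega)]
    exact ih (fun k' hk' => h k' (by omega))

lemma pv_scan_find (cs : List Char) (lo hi : Int) (cnt : Nat) (m : Int) (v : Int)
    (h1 : pvInner cs hi m = some v) (h2 : lo ≤ m) (h3 : m < lo + cnt)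
    (h4 : ∀ j : Int, m < j → j < lo + cnt → pvInner cs hi j = none) :
    pvScanB cs lo hi cnt = some v := by
  induction cnt with
  | zero => omega
  | succ k ih =>
    rw [pv_scanB_succ]
    by_cases hm : m = lo + k
    · rw [← hm, h1]
    · rw [h4 (lo + k) (by omega) (by omega)]
      exact ih (by omega) (fun j hj1 hj2 => h4 j hj1 (by omega))

-- ===== VERDICT (by name: the statement is the Claim_ definition above) =====
theorem find_in_string_spec : Claim_equal_find_in_string := by
  intro string a b _hdom
  unfold Spec_find_in_string
  have hwordsA : ∀ wv ∈ pvNumsA, wv.1.toList ≠ [] := fun wv h => (pv_words_ok wv h).1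
  have halt : find_in_string_alt string a b =
      pvScanB string.toList (pvLoI string.toList.length a) (pvHiI string.toList.length b)
        ((pvHiI string.toList.length b - pvLoI string.toList.length a)).toNat := rfl
  have hA : find_in_string string a b =
      (if (match pvRef string a b pvNumsA with
           | none => ((0 : Int), (-1 : Int))
           | some (v, m) => if m > -1 then (v, m) else (0, -1)).1 ≠ 0
       then some (match pvRef string a b pvNumsA with
           | none => ((0 : Int), (-1 : Int))
           | some (v, m) => if m > -1 then (v, m) else (0, -1)).1 else none) := by
    rw [find_in_string]
    rw [pv_fold_ref string a b pvNumsA 0 (-1)]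
  rcases pv_ref_spec string a b pvNumsA hwordsA with ⟨h1, h2⟩ |
      ⟨v, m, l1, wvS, l2, h1, h2, h3, h4, h5, h6, h7⟩
  · -- no word occurs in the window: both sides return none
    have hL : find_in_string string a b = none := by rw [hA, h1]; norm_num
    have hR : find_in_string_alt string a b = none := by
      rw [halt]
      apply pv_scan_none
      intro k _hk
      refine pv_inner_none string.toList a b _ (by omega) ?_
      intro wv hwv hW
      rcases pv_r_spec string a b wv (hwordsA wv hwv) with ⟨_, hnone⟩ | ⟨m', hm', _, _⟩
      · exact hnone _ hW
      · rw [h2 wv hwv] at hm'; exfalso; omega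
    rw [hL, hR]
  · -- the first word wvS with the maximal match index m wins on both sides
    have hmem : wvS ∈ pvNumsA := by rw [h2]; simp
    rcases pv_r_spec string a b wvS (hwordsA wvS hmem) with ⟨hr1, _⟩ | ⟨mN, hr1, hW, hmax⟩
    · exact absurd hr1 h5
    have hm : m = (mN : Int) := by rw [← h3, hr1]
    have hv0 : v ≠ 0 := by rw [h4]; exact (pv_words_ok wvS hmem).2
    have hL : find_in_string string a b = some v := by
      rw [hA, h1]
      have hm1 : m > -1 := by omega
      simp [hm1, hv0]
    have hlen1 : 1 ≤ wvS.1.toList.length := by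
      rcases List.exists_cons_of_ne_nil (hwordsA wvS hmem) with ⟨x, xs, hq⟩
      rw [hq]; simp
    have hWlo := hW.1
    have hWfit := hW.2.1
    have hWpre := hW.2.2
    have hR : find_in_string_alt string a b = some v := by
      rw [halt]
      apply pv_scan_find _ _ _ _ ((mN : Int)) v
      · -- the inner loop at position m returns v
        rw [pvInner, h2, List.findSome?_append]
        have hl1 : l1.findSome? (fun wv =>
            if (((mN : Int)) + (wv.1.toList.length : Int) ≤ pvHiI string.toList.length b ∧
                PySem.Chars.slice string.toList (some ((mN : Int)))
                  (some (((mN : Int)) + (wv.1.toList.length : Int))) = wv.1.toList)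
            then some wv.2 else none) = none := by
          rw [List.findSome?_eq_none_iff]
          intro wv hwv
          rw [if_neg]
          intro hcond
          have hwvA : wv ∈ pvNumsA := by rw [h2]; exact List.mem_append_left _ hwv
          rw [pv_cond_iff string.toList b wv ((mN : Int)) (by positivity)] at hcond
          have hWwv : pvW string.toList a b wv mN := by
            refine ⟨hWlo, ?_, ?_⟩
            · exact hcond.1
            · have : ((mN : Int)).toNat = mN := by omega
              rw [← this]; exact hcond.2
          rcases pv_r_spec string a b wv (hwordsA wv hwvA) with ⟨_, hnone⟩ | ⟨m', hm', _, hmax'⟩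
          · exact hnone mN hWwv
          · have hle : mN ≤ m' := by
              by_contra hcon
              exact hmax' mN (by omega) hWwv
            have := h6 wv hwv
            omega
        rw [hl1]
        have hcond : (if (((mN : Int)) + (wvS.1.toList.length : Int) ≤ pvHiI string.toList.length b ∧
                PySem.Chars.slice string.toList (some ((mN : Int)))
                  (some (((mN : Int)) + (wvS.1.toList.length : Int))) = wvS.1.toList)
            then some wvS.2 else none) = some v := by
          rw [if_pos, h4]
          rw [pv_cond_iff string.toList b wvS ((mN : Int)) (by positivity)]
          refine ⟨hWfit, ?_⟩
          have : ((mN : Int)).toNat = mN := by omega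
          rw [this]; exact hWpre
        simp only [List.findSome?_cons, hcond]
        rfl
      · exact hWlo
      · omega
      · intro j hj1 hj2
        refine pv_inner_none string.toList a b _ (by omega) ?_
        intro wv hwv hWj
        rcases pv_r_spec string a b wv (hwordsA wv hwv) with ⟨_, hnone⟩ | ⟨m', hm', _, hmax'⟩
        · exact hnone _ hWj
        · by_cases hlt : m' < j.toNat
          · exact hmax' _ hlt hWj
          · have h77 := h7 wv hwv
            exfalso; omega
    rw [hL, hR]
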